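-- pv_equiv track=rewrite | github.com/ldayton/Parable | src/parable/ast.py | _strip_arith_line_continuations
-- ===== SOURCE A (Python) =====
-- def _strip_arith_line_continuations(value: str) -> str:
--     """Strip backslash-newline (line continuation) from inside $((...))."""
--     result = []
--     i = 0
--     while i < len(value):
--         # Check for $(( arithmetic expression
--         if value[i : i + 3] == "$((":
--             # Find matching ))
--             start = i
--             i += 3
--             depth = 1
--             arith_content = []
--             while i < len(value) and depth > 0:
--                 if value[i : i + 2] == "((":
--                     arith_content.append("((")
--                     depth += 1
--                     i += 2
--                 elif value[i : i + 2] == "))":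
--                     depth -= 1
--                     if depth > 0:
--                         arith_content.append("))")
--                     i += 2
--                 elif value[i] == "\\" and i + 1 < len(value) and value[i + 1] == "\n":
--                     # Skip backslash-newline (line continuation)
--                     i += 2
--                 else:
--                     arith_content.append(value[i])
--                     i += 1
--             if depth == 0:
--                 # Found proper )) closing - this is arithmetic
--                 result.append("$((" + "".join(arith_content) + "))")
--             else:
--                 # Didn't find )) - not arithmetic (likely $( + ( subshell), pass through
--                 result.append(value[start:i])
--         else:
--             result.append(value[i])
--             i += 1
--     return "".join(result)
-- ===== SOURCE B (Python) =====
-- def _find_arith_regions(value):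
--     """Pass 1: index spans (start, end) of the contents of balanced $((...)) regions."""
--     regions = []
--     n = len(value)
--     i = 0
--     while i < n:
--         if value[i : i + 3] == "$((":
--             j = i + 3
--             depth = 1
--             while j < n and depth > 0:
--                 pair = value[j : j + 2]
--                 if pair == "((":
--                     depth += 1
--                     j += 2
--                 elif pair == "))":
--                     depth -= 1
--                     j += 2
--                 else:
--                     j += 1
--             if depth == 0:
--                 regions.append((i + 3, j - 2))
--             i = j
--         else:
--             i += 1
--     return regions
--
--
-- def _strip_arith_line_continuations(value: str) -> str:
--     """Strip backslash-newline (line continuation) from inside $((...))."""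
--     pieces = []
--     pos = 0
--     for a, b in _find_arith_regions(value):
--         pieces.append(value[pos:a])
--         pieces.append(value[a:b].replace("\\\n", ""))
--         pos = b
--     pieces.append(value[pos:])
--     return "".join(pieces)
-- ===== Notes on version B (the rewrite author's own statement) =====
-- stated objective: simpler
-- what changed: A is one nested scan that copies the arithmetic body character by character, dropping backslash-newlines as it goes; B is two staged passes: a first pass that only records the index spans of balanced $((...)) bodies via a depth-only bracket scan (no backslash handling at all), then an assembly pass that concatenates raw slices between/around regions and applies one str.replace per region body.
import Mathlib
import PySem

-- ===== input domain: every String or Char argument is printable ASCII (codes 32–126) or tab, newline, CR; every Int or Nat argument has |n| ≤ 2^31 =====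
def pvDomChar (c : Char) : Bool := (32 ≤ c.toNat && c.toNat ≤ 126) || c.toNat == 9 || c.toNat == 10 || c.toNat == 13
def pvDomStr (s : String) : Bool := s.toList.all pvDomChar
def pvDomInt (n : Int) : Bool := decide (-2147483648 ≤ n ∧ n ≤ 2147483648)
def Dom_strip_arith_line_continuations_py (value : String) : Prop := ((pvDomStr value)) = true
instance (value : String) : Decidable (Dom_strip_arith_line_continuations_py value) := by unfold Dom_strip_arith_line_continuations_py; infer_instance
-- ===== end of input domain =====

-- B replaces A's single nested scan (which copies the arithmetic body char by char, dropping
-- backslash-newlines on the fly) by two staged passes: pass 1 records the index spans of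
-- balanced $((...)) bodies via a depth-only bracket scan, pass 2 rebuilds the output from raw
-- slices plus one replace per region body; objective: simpler (no speed claim).

-- ===== PORT A =====
-- A's inner while loop: walks the tail after "$((" accumulating `arith_content`
-- (pairs "((" / "))" kept, "\"+newline skipped), returns (content, rest-after-close, balanced?).
def stripInnerA : List Char → Nat → List Char × List Char × Bool
  | [], _ => ([], [], false)
  | c1 :: c2 :: cs, d =>
    if c1 = '(' ∧ c2 = '(' then
      ('(' :: '(' :: (stripInnerA cs (d + 1)).1, (stripInnerA cs (d + 1)).2)
    else if c1 = ')' ∧ c2 = ')' then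
      if d = 1 then ([], cs, true)
      else (')' :: ')' :: (stripInnerA cs (d - 1)).1, (stripInnerA cs (d - 1)).2)
    else if c1 = '\\' ∧ c2 = '\n' then stripInnerA cs d
    else (c1 :: (stripInnerA (c2 :: cs) d).1, (stripInnerA (c2 :: cs) d).2)
  | [c], _ => ([c], [], false)

-- used by stripA's termination proof
theorem stripInnerA_rest_le : ∀ (l : List Char) (d : Nat), (stripInnerA l d).2.1.length ≤ l.length := by
  intro l d
  fun_induction stripInnerA l d <;> simp_all <;> omega

-- A's outer while loop. In the unbalanced branch A appends value[start:i] with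
-- i = len(value) (the inner loop exhausted the input), i.e. "$((" ++ the whole tail.
def stripA : List Char → List Char
  | [] => []
  | '$' :: '(' :: '(' :: cs =>
    if (stripInnerA cs 1).2.2 then
      '$' :: '(' :: '(' :: ((stripInnerA cs 1).1 ++ ')' :: ')' :: stripA (stripInnerA cs 1).2.1)
    else '$' :: '(' :: '(' :: cs
  | c :: cs => c :: stripA cs
  termination_by l => l.length
  decreasing_by
    · have := stripInnerA_rest_le cs 1; simp; omega
    · simp

def strip_arith_line_continuations_py (value : String) : String :=
  String.ofList (stripA value.toList)

-- ===== PORT B =====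
-- Source B's inner depth-only scan: returns (number of chars before the closing "))", balanced?).
-- No backslash handling here at all — B only locates brackets in pass 1.
def scanClose : List Char → Nat → Nat × Bool
  | c1 :: c2 :: cs, d =>
    if c1 = '(' ∧ c2 = '(' then
      ((scanClose cs (d + 1)).1 + 2, (scanClose cs (d + 1)).2)
    else if c1 = ')' ∧ c2 = ')' then
      if d = 1 then (0, true)
      else ((scanClose cs (d - 1)).1 + 2, (scanClose cs (d - 1)).2)
    else ((scanClose (c2 :: cs) d).1 + 1, (scanClose (c2 :: cs) d).2)
  | [_], _ => (1, false)
  | [], _ => (0, false)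

-- pass 1 (_find_arith_regions): absolute index spans (a, b) of balanced $((...)) bodies;
-- the Nat argument is the absolute index of the current suffix. An unbalanced scan consumes
-- the whole rest of the string (i = j = n in Source B), so no further regions follow: [].
def regionsAux : List Char → Nat → List (Nat × Nat)
  | '$' :: '(' :: '(' :: cs, i =>
    if (scanClose cs 1).2 then
      (i + 3, i + 3 + (scanClose cs 1).1) ::
        regionsAux (cs.drop ((scanClose cs 1).1 + 2)) (i + 3 + (scanClose cs 1).1 + 2)
    else []
  | _ :: cs, i => regionsAux cs (i + 1)
  | [], _ => []
  termination_by l _ => l.length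
  decreasing_by
    · simp; omega
    · simp

-- Source B's `.replace("\\\n", "")`: one left-to-right pass removing non-overlapping occurrences
-- (exact for this two-char pattern).
def replBsNl : List Char → List Char
  | '\\' :: '\n' :: cs => replBsNl cs
  | c :: cs => c :: replBsNl cs
  | [] => []

-- pass 2: Source B's assembly loop over the regions list, `pos` is the absolute resume index.
def assemble : List Char → Nat → List (Nat × Nat) → List Char
  | v, pos, [] => v.drop pos
  | v, pos, (a, b) :: rs =>
    (v.drop pos).take (a - pos) ++ replBsNl ((v.drop a).take (b - a)) ++ assemble v b rs

def strip_arith_line_continuations_py_alt (value : String) : String :=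
  String.ofList (assemble value.toList 0 (regionsAux value.toList 0))

-- ===== PRECONDITION & SPEC =====
def Spec_strip_arith_line_continuations_py (value : String) (out : String) : Prop := out = strip_arith_line_continuations_py_alt value
instance (value : String) (out : String) : Decidable (Spec_strip_arith_line_continuations_py value out) := by unfold Spec_strip_arith_line_continuations_py; infer_instance

-- ===== CLAIM (what is proved, stated in full; the proofs are below) =====
def Claim_equal_strip_arith_line_continuations_py : Prop := ∀ (value : String), Dom_strip_arith_line_continuations_py value → Spec_strip_arith_line_continuations_py value (strip_arith_line_continuations_py value)

-- ===== LEMMAS AND PROOFS =====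
theorem replBsNl_cons (c : Char) (xs : List Char) (h : c ≠ '\\' ∨ xs.head? ≠ some '\n') :
    replBsNl (c :: xs) = c :: replBsNl xs := by
  cases xs with
  | nil => rw [replBsNl.eq_def]; split <;> simp_all
  | cons x t => rw [replBsNl.eq_def]; split <;> simp_all

theorem replBsNl_op (xs : List Char) : replBsNl ('(' :: xs) = '(' :: replBsNl xs :=
  replBsNl_cons _ _ (Or.inl (by decide))

theorem replBsNl_cp (xs : List Char) : replBsNl (')' :: xs) = ')' :: replBsNl xs :=
  replBsNl_cons _ _ (Or.inl (by decide))

theorem replBsNl_bsnl (cs : List Char) : replBsNl ('\\' :: '\n' :: cs) = replBsNl cs := by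
  rw [replBsNl]

theorem scanClose_step (c1 c2 : Char) (cs : List Char) (d : Nat)
    (h1 : ¬(c1 = '(' ∧ c2 = '(')) (h2 : ¬(c1 = ')' ∧ c2 = ')')) :
    scanClose (c1 :: c2 :: cs) d = ((scanClose (c2 :: cs) d).1 + 1, (scanClose (c2 :: cs) d).2) := by
  rw [scanClose]; simp [h1, h2]

theorem scanClose_nl (cs : List Char) (d : Nat) :
    scanClose ('\n' :: cs) d = ((scanClose cs d).1 + 1, (scanClose cs d).2) := by
  cases cs with
  | nil => simp [scanClose]
  | cons x t => rw [scanClose_step _ _ _ _ (by simp) (by simp)]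

-- the two inner scans agree: A's accumulated content is replBsNl of B's slice, the
-- balanced flags coincide, a balanced scan stops exactly at a "))" (so A's rest is
-- the drop past it), and an unbalanced scan consumes the whole suffix.
theorem inner_eq : ∀ (l : List Char) (d : Nat),
    (stripInnerA l d).1 = replBsNl (l.take (scanClose l d).1) ∧
    (stripInnerA l d).2.2 = (scanClose l d).2 ∧
    ((scanClose l d).2 = true →
      (stripInnerA l d).2.1 = l.drop ((scanClose l d).1 + 2) ∧
      l.drop (scanClose l d).1 = ')' :: ')' :: l.drop ((scanClose l d).1 + 2)) ∧
    ((scanClose l d).2 = false → (scanClose l d).1 = l.length) := by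
  intro l d
  fun_induction stripInnerA l d with
  | case1 d => simp [scanClose, replBsNl]
  | case2 c1 c2 cs d h ih =>
    obtain ⟨h1, h2⟩ := h; subst h1; subst h2
    obtain ⟨ih1, ih2, ih3, ih4⟩ := ih
    have hs : scanClose ('(' :: '(' :: cs) d = ((scanClose cs (d + 1)).1 + 2, (scanClose cs (d + 1)).2) := by
      rw [scanClose]; simp
    rw [hs]
    refine ⟨?_, ?_, fun hb => ?_, fun hb => ?_⟩
    · simp [ih1, List.take_succ_cons, replBsNl_op]
    · simpa using ih2
    · obtain ⟨e1, e2⟩ := ih3 (by simpa using hb)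
      constructor
      · simpa [Nat.add_assoc] using e1
      · simpa [Nat.add_assoc] using e2
    · have := ih4 (by simpa using hb); simp [this]
  | case3 c1 c2 cs h1 h2 =>
    obtain ⟨ha, hb⟩ := h2; subst ha; subst hb
    have hs : scanClose (')' :: ')' :: cs) 1 = (0, true) := by
      rw [scanClose]; simp
    rw [hs]
    refine ⟨by simp [replBsNl], by simp, fun _ => ⟨by simp, by simp⟩, by simp⟩
  | case4 c1 c2 cs d h1 h2 hd ih =>
    obtain ⟨ha, hb⟩ := h2; subst ha; subst hb
    obtain ⟨ih1, ih2, ih3, ih4⟩ := ih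
    have hs : scanClose (')' :: ')' :: cs) d = ((scanClose cs (d - 1)).1 + 2, (scanClose cs (d - 1)).2) := by
      rw [scanClose]; simp [hd]
    rw [hs]
    refine ⟨?_, ?_, fun hb => ?_, fun hb => ?_⟩
    · simp [ih1, List.take_succ_cons, replBsNl_cp]
    · simpa using ih2
    · obtain ⟨e1, e2⟩ := ih3 (by simpa using hb)
      constructor
      · simpa [Nat.add_assoc] using e1
      · simpa [Nat.add_assoc] using e2
    · have := ih4 (by simpa using hb); simp [this]
  | case5 c1 c2 cs d h1 h2 h3 ih =>
    obtain ⟨ha, hb⟩ := h3; subst ha; subst hb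
    obtain ⟨ih1, ih2, ih3, ih4⟩ := ih
    have hs : scanClose ('\\' :: '\n' :: cs) d = ((scanClose cs d).1 + 2, (scanClose cs d).2) := by
      rw [scanClose_step _ _ _ _ (by simp) (by simp), scanClose_nl]
    rw [hs]
    refine ⟨?_, ?_, fun hb => ?_, fun hb => ?_⟩
    · simp [ih1, List.take_succ_cons, replBsNl_bsnl]
    · simpa using ih2
    · obtain ⟨e1, e2⟩ := ih3 (by simpa using hb)
      constructor
      · simpa [Nat.add_assoc] using e1
      · simpa [Nat.add_assoc] using e2
    · have := ih4 (by simpa using hb); simp [this]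
  | case6 c1 c2 cs d h1 h2 h3 ih =>
    obtain ⟨ih1, ih2, ih3, ih4⟩ := ih
    have hs := scanClose_step c1 c2 cs d h1 h2
    rw [hs]
    refine ⟨?_, ?_, fun hb => ?_, fun hb => ?_⟩
    · have hcons : replBsNl (c1 :: List.take (scanClose (c2 :: cs) d).1 (c2 :: cs)) =
          c1 :: replBsNl (List.take (scanClose (c2 :: cs) d).1 (c2 :: cs)) := by
        apply replBsNl_cons
        by_cases hc : c1 = '\\'
        · right
          cases hn : (scanClose (c2 :: cs) d).1 with
          | zero => simp
          | succ m =>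
            simp only [List.take_succ_cons, List.head?_cons]
            intro h'
            exact h3 ⟨hc, by injection h'⟩
        · exact Or.inl hc
      simp [ih1, List.take_succ_cons, hcons]
    · simpa using ih2
    · obtain ⟨e1, e2⟩ := ih3 (by simpa using hb)
      constructor
      · simpa [Nat.add_assoc] using e1
      · simpa [Nat.add_assoc] using e2
    · have := ih4 (by simpa using hb); simp [this]
  | case7 c d =>
    refine ⟨?_, by simp [scanClose], by simp [scanClose], by simp [scanClose]⟩
    simp [scanClose, replBsNl, replBsNl_cons c [] (by simp)]

-- every region produced by regionsAux starts at least 3 past the scan start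
theorem regions_head_ge : ∀ (l : List Char) (i : Nat) (a b : Nat),
    (regionsAux l i).head? = some (a, b) → i + 3 ≤ a := by
  intro l i
  fun_induction regionsAux l i with
  | case1 cs i h => intro a b hh; simp at hh; omega
  | case2 cs i h => simp
  | case3 c cs i h ih => intro a b hh; have := ih a b hh; omega
  | case4 i => simp

theorem drop_shift (v : List Char) (pos : Nat) (c : Char) (t : List Char)
    (hd : v.drop pos = c :: t) : v.drop (pos + 1) = t := by
  have h1 : List.drop 1 (List.drop pos v) = List.drop (pos + 1) v := List.drop_drop ..
  rw [← h1, hd, List.drop_succ_cons, List.drop_zero]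

-- peeling one already-known character off the front of assemble's remaining suffix
theorem assemble_peel (v : List Char) (pos : Nat) (c : Char) (t : List Char)
    (rs : List (Nat × Nat)) (hd : v.drop pos = c :: t)
    (hge : ∀ a b, rs.head? = some (a, b) → pos + 1 ≤ a) :
    assemble v pos rs = c :: assemble v (pos + 1) rs := by
  cases rs with
  | nil => simp [assemble, hd, drop_shift v pos c t hd]
  | cons p rs =>
    obtain ⟨a, b⟩ := p
    have hga : pos + 1 ≤ a := hge a b (by simp)
    have h1 : a - pos = (a - (pos + 1)) + 1 := by omega
    simp only [assemble, hd, h1, List.take_succ_cons, drop_shift v pos c t hd]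
    simp

-- the central equivalence: pass1+pass2 on the suffix at absolute index i equals A's scan of it
theorem main_eq : ∀ (l : List Char) (i : Nat) (v : List Char),
    v.drop i = l → assemble v i (regionsAux l i) = stripA l := by
  intro l i
  fun_induction regionsAux l i with
  | case1 cs i h ih =>
    intro v hv
    obtain ⟨e1, e2, e3, _⟩ := inner_eq cs 1
    obtain ⟨er, ed⟩ := e3 h
    set k := (scanClose cs 1).1 with hk
    have hcs : v.drop (i + 3) = cs := by
      have h3 : List.drop 3 (List.drop i v) = List.drop (i + 3) v := List.drop_drop ..
      rw [← h3, hv]; simp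
    have hdropk : v.drop (i + 3 + k) = cs.drop k := by
      have h3 : List.drop k (List.drop (i + 3) v) = List.drop (i + 3 + k) v := List.drop_drop ..
      rw [← h3, hcs]
    have hdropk2 : v.drop (i + 3 + k + 2) = cs.drop (k + 2) := by
      have h3 : List.drop 2 (List.drop (i + 3 + k) v) = List.drop (i + 3 + k + 2) v := List.drop_drop ..
      rw [← h3, hdropk, ed]
      simp
    -- heads at the closing "))"
    have hco : v.drop (i + 3 + k) = ')' :: ')' :: cs.drop (k + 2) := by rw [hdropk, ed]
    have hco1 : v.drop (i + 3 + k + 1) = ')' :: cs.drop (k + 2) :=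
      drop_shift v (i + 3 + k) _ _ hco
    -- region-start bounds for the tail regions
    have hge1 : ∀ a b, (regionsAux (cs.drop (k + 2)) (i + 3 + k + 2)).head? = some (a, b) →
        i + 3 + k + 1 ≤ a := by
      intro a b hh; have := regions_head_ge _ _ a b hh; omega
    have hge2 : ∀ a b, (regionsAux (cs.drop (k + 2)) (i + 3 + k + 2)).head? = some (a, b) →
        i + 3 + k + 1 + 1 ≤ a := by
      intro a b hh; have := regions_head_ge _ _ a b hh; omega
    -- unfold assemble on the cons
    have hA : assemble v i ((i + 3, i + 3 + k) :: regionsAux (cs.drop (k + 2)) (i + 3 + k + 2)) =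
        (v.drop i).take 3 ++ replBsNl ((v.drop (i + 3)).take k) ++
          assemble v (i + 3 + k) (regionsAux (cs.drop (k + 2)) (i + 3 + k + 2)) := by
      simp [assemble]
    rw [hA, hv, hcs]
    rw [assemble_peel v (i + 3 + k) _ _ _ hco hge1,
        assemble_peel v (i + 3 + k + 1) _ _ _ hco1 hge2]
    have hIH := ih v (by simpa [Nat.add_assoc] using hdropk2)
    have hbalA : (stripInnerA cs 1).2.2 = true := by rw [e2]; exact h
    rw [stripA]
    simp only [hbalA, if_pos, e1, er]
    have h2eq : i + 3 + k + 1 + 1 = i + 3 + k + 2 := by omega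
    rw [h2eq, hIH]
    simp
  | case2 cs i h =>
    intro v hv
    obtain ⟨_, e2, _, _⟩ := inner_eq cs 1
    have hbalA : (stripInnerA cs 1).2.2 = false := by rw [e2]; simpa using h
    rw [stripA]
    simp only [hbalA]
    simp [assemble, hv]
  | case3 c cs i hne ih =>
    intro v hv
    have hcs : v.drop (i + 1) = cs := drop_shift v i c cs hv
    have hge : ∀ a b, (regionsAux cs (i + 1)).head? = some (a, b) → i + 1 ≤ a := by
      intro a b hh; have := regions_head_ge _ _ a b hh; omega
    have hstep : stripA (c :: cs) = c :: stripA cs := by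
      conv_lhs => rw [stripA.eq_def]
      split <;> simp_all
    rw [hstep, assemble_peel v i c cs _ hv hge, ih v hcs]
  | case4 i =>
    intro v hv
    simp [assemble, hv, stripA]

-- ===== VERDICT (by name: the statement is the Claim_ definition above) =====
theorem strip_arith_line_continuations_py_spec : Claim_equal_strip_arith_line_continuations_py := by
  intro value _
  unfold Spec_strip_arith_line_continuations_py strip_arith_line_continuations_py strip_arith_line_continuations_py_alt
  rw [main_eq value.toList 0 value.toList (by simp)]
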